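-- pv_equiv track=rewrite | github.com/v1docq/Test-task | json_to_html.py | parse_closing_tag
-- ===== SOURCE A (Python) =====
-- def parse_closing_tag(tag_mark):
--         result = ''
--         isId = False
--         isClass = False
--
--         for ch in tag_mark:
--             if ch == '#':
--                 isId = True
--                 isClass = False
--                 continue
--             if ch == '.':
--                 isClass = True
--                 isId = False
--                 continue
--
--             if isId | isClass:
--                 continue
--             else:
--                 result += ch
--         return result
-- ===== SOURCE B (Python) =====
-- def parse_closing_tag(tag_mark):
--     cuts = [i for i in (tag_mark.find('#'), tag_mark.find('.')) if i >= 0]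
--     if cuts:
--         return tag_mark[:min(cuts)]
--     return tag_mark
-- ===== Notes on version B (the rewrite author's own statement) =====
-- stated objective: simpler
-- what changed: A's stateful character-by-character accumulation with isId/isClass flags is replaced by locating the first id-marker and first class-marker via str.find and slicing tag_mark before the smaller non-negative index (whole string if neither occurs).
import Mathlib
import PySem

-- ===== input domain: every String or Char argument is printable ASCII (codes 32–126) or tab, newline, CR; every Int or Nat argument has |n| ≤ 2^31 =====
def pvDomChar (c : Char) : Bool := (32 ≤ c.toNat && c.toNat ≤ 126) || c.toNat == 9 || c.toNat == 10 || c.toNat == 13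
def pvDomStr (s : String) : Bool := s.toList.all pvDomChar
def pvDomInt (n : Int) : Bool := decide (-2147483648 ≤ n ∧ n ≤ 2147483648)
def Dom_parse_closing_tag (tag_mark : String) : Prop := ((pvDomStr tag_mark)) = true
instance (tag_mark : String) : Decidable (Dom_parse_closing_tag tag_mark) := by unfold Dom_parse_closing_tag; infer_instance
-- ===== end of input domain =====

-- B replaces A's stateful character-accumulating loop by find-the-first-marker-then-slice (simpler; a timing run measured it faster by a constant factor: C-level str.find/slice vs a Python char loop).

-- ===== PORT A =====
-- A's loop body: state = (result, isId, isClass); each branch in A's order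
def pvStepA (st : List Char × Bool × Bool) (ch : Char) : List Char × Bool × Bool :=
  if ch = '#' then (st.1, true, false)
  else if ch = '.' then (st.1, false, true)
  else if st.2.1 || st.2.2 then st
  else (st.1 ++ [ch], st.2.1, st.2.2)

def parse_closing_tag (tag_mark : String) : String :=
  String.ofList (tag_mark.toList.foldl pvStepA ([], false, false)).1

-- ===== PORT B =====
def parse_closing_tag_alt (tag_mark : String) : String :=
  let cuts := [PySem.Str.find tag_mark "#", PySem.Str.find tag_mark "."].filter (fun i => decide (0 ≤ i))
  match PySem.List.min? cuts id with
  | some m => PySem.Str.slice tag_mark none (some m)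
  | none => tag_mark

-- ===== PRECONDITION & SPEC =====
def Spec_parse_closing_tag (tag_mark : String) (out : String) : Prop := out = parse_closing_tag_alt tag_mark
instance (tag_mark : String) (out : String) : Decidable (Spec_parse_closing_tag tag_mark out) := by unfold Spec_parse_closing_tag; infer_instance

-- ===== CLAIM (what is proved, stated in full; the proofs are below) =====
def Claim_equal_parse_closing_tag : Prop := ∀ (tag_mark : String), Dom_parse_closing_tag tag_mark → Spec_parse_closing_tag tag_mark (parse_closing_tag tag_mark)

-- ===== LEMMAS AND PROOFS =====

def pvKeep (c : Char) : Bool := c ≠ '#' && c ≠ '.'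

-- once a flag is set, A's loop adds nothing to result
theorem pvA_flag (l : List Char) (res : List Char) (f1 f2 : Bool) (h : f1 || f2 = true) :
    (l.foldl pvStepA (res, f1, f2)).1 = res := by
  induction l generalizing f1 f2 with
  | nil => rfl
  | cons c t ih =>
    rw [List.foldl_cons]
    by_cases h1 : c = '#'
    · rw [show pvStepA (res, f1, f2) c = (res, true, false) by simp [pvStepA, h1]]
      exact ih true false rfl
    · by_cases h2 : c = '.'
      · rw [show pvStepA (res, f1, f2) c = (res, false, true) by simp [pvStepA, h2]]
        exact ih false true rfl
      · rw [show pvStepA (res, f1, f2) c = (res, f1, f2) by cases f1 <;> cases f2 <;> simp_all [pvStepA]]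
        exact ih f1 f2 h

theorem pvA_core (l : List Char) (res : List Char) :
    (l.foldl pvStepA (res, false, false)).1
    = res ++ l.takeWhile pvKeep := by
  induction l generalizing res with
  | nil => simp
  | cons c t ih =>
    rw [List.foldl_cons]
    by_cases h1 : c = '#'
    · rw [show pvStepA (res, false, false) c = (res, true, false) by simp [pvStepA, h1]]
      rw [pvA_flag t res true false rfl]
      simp [pvKeep, h1]
    · by_cases h2 : c = '.'
      · rw [show pvStepA (res, false, false) c = (res, false, true) by simp [pvStepA, h2]]
        rw [pvA_flag t res false true rfl]
        simp [pvKeep, h2]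
      · rw [show pvStepA (res, false, false) c = (res ++ [c], false, false) by simp [pvStepA, h1, h2]]
        rw [ih]
        simp [pvKeep, h1, h2]

theorem pv_singleton_prefix_iff (c : Char) (l : List Char) (k : Nat) :
    [c] <+: l.drop k ↔ l[k]? = some c := by
  constructor
  · rintro ⟨t, ht⟩
    have : (l.drop k)[0]? = some c := by rw [← ht]; rfl
    simpa using this
  · intro h
    have hk : k < l.length := (List.getElem?_eq_some_iff.mp h).1
    refine ⟨l.drop (k+1), ?_⟩
    rw [List.drop_eq_getElem_cons hk]
    simp only [List.getElem?_eq_some_iff] at h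
    obtain ⟨_, hc⟩ := h
    rw [hc]
    rfl

theorem pv_takeWhile_eq_self (l : List Char) (h1 : '#' ∉ l) (h2 : '.' ∉ l) :
    l.takeWhile pvKeep = l := by
  rw [List.takeWhile_eq_self_iff]
  intro c hc
  simp [pvKeep]
  constructor <;> rintro rfl <;> [exact h1 hc; exact h2 hc]

theorem pv_takeWhile_eq_take (l : List Char) (m : Nat)
    (hm : l[m]? = some '#' ∨ l[m]? = some '.')
    (hlt : ∀ k, k < m → l[k]? ≠ some '#' ∧ l[k]? ≠ some '.') :
    l.takeWhile pvKeep = l.take m := by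
  induction l generalizing m with
  | nil => simp at hm
  | cons c t ih =>
    cases m with
    | zero =>
      simp at hm
      rcases hm with rfl | rfl <;> simp [pvKeep]
    | succ n =>
      have h0 := hlt 0 (Nat.succ_pos n)
      simp at h0
      have hc : pvKeep c = true := by simp [pvKeep]; exact ⟨h0.1, h0.2⟩

      simp only [List.takeWhile_cons, hc, if_true, List.take_succ_cons]
      rw [ih n (by simpa using hm) (fun k hk => by have := hlt (k+1) (by omega); simpa using this)]

theorem pv_main (tag : String) : parse_closing_tag tag = parse_closing_tag_alt tag := by
  unfold parse_closing_tag parse_closing_tag_alt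
  rw [pvA_core]
  simp only [PySem.Str.find_eq, List.nil_append]
  rw [show ("#" : String).toList = ['#'] from rfl, show ("." : String).toList = ['.'] from rfl]
  set l := tag.toList with hl
  set i := PySem.Chars.find l ['#'] with hi
  set j := PySem.Chars.find l ['.'] with hj
  have hIlo : -1 ≤ i := PySem.Chars.neg_one_le_find l ['#']
  have hJlo : -1 ≤ j := PySem.Chars.neg_one_le_find l ['.']
  have hnotmem : ∀ (c : Char), PySem.Chars.find l [c] = -1 → c ∉ l := by
    intro c h hc
    exact (PySem.Chars.find_eq_neg_one_iff l [c]).mp h ((List.singleton_infix_iff c l).mpr hc)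
  have hat : ∀ (c : Char), 0 ≤ PySem.Chars.find l [c] →
      l[(PySem.Chars.find l [c]).toNat]? = some c ∧
      ∀ k, k < (PySem.Chars.find l [c]).toNat → l[k]? ≠ some c := by
    intro c hc
    obtain ⟨hpre, hmin⟩ := PySem.Chars.find_spec hc
    refine ⟨(pv_singleton_prefix_iff c l _).mp hpre, fun k hk hmem => ?_⟩
    exact hmin k hk ((pv_singleton_prefix_iff c l k).mpr hmem)
  have hne : ∀ (c : Char) (k : Nat), c ∉ l → l[k]? ≠ some c := by
    intro c k hc h
    exact hc (List.mem_of_getElem? h)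
  by_cases hI : 0 ≤ i
  · by_cases hJ : 0 ≤ j
    · -- both found: min of the two indices
      rw [show [i, j].filter (fun n => decide (0 ≤ n)) = [i, j] by simp [hI, hJ]]
      rw [show PySem.List.min? [i, j] id = some (if j < i then j else i) by
        by_cases h : j < i <;> simp [PySem.List.min?, h]]
      obtain ⟨hiat, hilt⟩ := hat '#' hI
      obtain ⟨hjat, hjlt⟩ := hat '.' hJ
      split_ifs with hlt
      · -- j < i
        apply String.toList_inj.mp
        rw [String.toList_ofList, PySem.Str.toList_slice, PySem.Chars.slice_eq_listSlice,
          PySem.List.slice_to _ hJ]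
        refine pv_takeWhile_eq_take l j.toNat (Or.inr hjat) (fun k hk => ?_)
        exact ⟨hilt k (by omega), hjlt k hk⟩
      · -- i ≤ j
        apply String.toList_inj.mp
        rw [String.toList_ofList, PySem.Str.toList_slice, PySem.Chars.slice_eq_listSlice,
          PySem.List.slice_to _ hI]
        refine pv_takeWhile_eq_take l i.toNat (Or.inl hiat) (fun k hk => ?_)
        exact ⟨hilt k hk, hjlt k (by omega)⟩
    · have hj1 : j = -1 := by omega
      rw [show [i, j].filter (fun n => decide (0 ≤ n)) = [i] by simp [hI, hJ]]
      rw [show PySem.List.min? [i] id = some i by simp [PySem.List.min?]]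
      obtain ⟨hiat, hilt⟩ := hat '#' hI
      apply String.toList_inj.mp
      rw [String.toList_ofList, PySem.Str.toList_slice, PySem.Chars.slice_eq_listSlice,
        PySem.List.slice_to _ hI]
      refine pv_takeWhile_eq_take l i.toNat (Or.inl hiat) (fun k hk => ?_)
      exact ⟨hilt k hk, hne '.' k (hnotmem '.' hj1)⟩
  · have hi1 : i = -1 := by omega
    by_cases hJ : 0 ≤ j
    · rw [show [i, j].filter (fun n => decide (0 ≤ n)) = [j] by simp [hI, hJ]]
      rw [show PySem.List.min? [j] id = some j by simp [PySem.List.min?]]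
      obtain ⟨hjat, hjlt⟩ := hat '.' hJ
      apply String.toList_inj.mp
      rw [String.toList_ofList, PySem.Str.toList_slice, PySem.Chars.slice_eq_listSlice,
        PySem.List.slice_to _ hJ]
      refine pv_takeWhile_eq_take l j.toNat (Or.inr hjat) (fun k hk => ?_)
      exact ⟨hne '#' k (hnotmem '#' hi1), hjlt k hk⟩
    · have hj1 : j = -1 := by omega
      rw [show [i, j].filter (fun n => decide (0 ≤ n)) = [] by simp [hI, hJ]]
      rw [show PySem.List.min? ([] : List Int) id = none from rfl]
      rw [pv_takeWhile_eq_self l (hnotmem '#' hi1) (hnotmem '.' hj1)]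
      exact String.ofList_toList

-- ===== VERDICT (by name: the statement is the Claim_ definition above) =====
theorem parse_closing_tag_spec : Claim_equal_parse_closing_tag := by
  intro tag _
  exact pv_main tag
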